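-- pv_equiv track=rewrite | github.com/DrPritt/VS_Code_files | Eeleksami_näidisül/kapid_moosipurgid.py | nihuta_alla
-- ===== SOURCE A (Python) =====
-- def nihuta_alla(masiiv):
--     pikkus = len(masiiv)-1
--     for i, rida in enumerate(masiiv):
--         for j, num in enumerate(rida):
--             if masiiv[pikkus-i][j] == 0:
--                 if pikkus-i-1 == -1:
--                     pass
--                 else:
--                     masiiv[pikkus-i][j] = masiiv[pikkus-i-1][j]
--                     masiiv[pikkus-i-1][j] = 0
--     return masiiv
-- ===== SOURCE B (Python) =====
-- def nihuta_alla(masiiv):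
--     # Per-column: find the lowest empty (==0) cell, then block-shift everything above it down one row.
--     if not masiiv:
--         return masiiv
--     n = len(masiiv)
--     for j in range(len(masiiv[0])):
--         L = None
--         for r in range(n - 1, -1, -1):
--             if masiiv[r][j] == 0:
--                 L = r
--                 break
--         if L is not None:
--             for r in range(L, 0, -1):
--                 masiiv[r][j] = masiiv[r - 1][j]
--             masiiv[0][j] = 0
--     return masiiv
-- ===== Notes on version B (the rewrite author's own statement) =====
-- stated objective: alternative
-- what changed: A sweeps every cell bottom-up and cascades each zero upward one swap at a time; B works per column, locating the lowest zero in one bottom-to-top scan and then doing a single block shift of the rows above it.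
-- outside the precondition, e.g. on nihuta_alla([[1, 2], [3], [4, 5]]): A returns [[1, 2], [3], [4, 5]], B raises IndexError
import Mathlib
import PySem

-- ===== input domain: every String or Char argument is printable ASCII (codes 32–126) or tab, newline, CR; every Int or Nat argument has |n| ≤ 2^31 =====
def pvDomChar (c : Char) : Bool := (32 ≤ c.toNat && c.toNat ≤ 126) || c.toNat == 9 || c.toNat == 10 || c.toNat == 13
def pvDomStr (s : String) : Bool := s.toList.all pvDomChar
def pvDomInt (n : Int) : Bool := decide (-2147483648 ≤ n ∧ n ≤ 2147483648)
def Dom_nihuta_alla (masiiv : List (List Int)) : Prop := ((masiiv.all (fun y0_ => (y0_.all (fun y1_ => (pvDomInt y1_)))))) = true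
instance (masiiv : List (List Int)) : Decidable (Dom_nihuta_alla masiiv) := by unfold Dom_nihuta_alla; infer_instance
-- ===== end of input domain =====

-- B replaces A's per-cell bottom-up cascade sweep by a per-column locate-the-lowest-zero scan
-- followed by a single block shift (alternative decomposition; return value AND in-place effect coincide,
-- equivalence proved here is about the returned matrix).

-- ===== PORT A =====
-- cell read masiiv[r][j] (rows/cols in range on all admitted inputs; default never observed under Pre_)
def pvGetCell (m : List (List Int)) (r j : Nat) : Int := (m.getD r []).getD j 0
-- cell write masiiv[r][j] = v
def pvSetCell (m : List (List Int)) (r j : Nat) (v : Int) : List (List Int) :=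
  m.set r ((m.getD r []).set j v)

-- body of A's inner loop at row index k = pikkus - i, column j
def aStep (k : Nat) (m : List (List Int)) (j : Nat) : List (List Int) :=
  if pvGetCell m k j == 0 then
    if k = 0 then m       -- 'pikkus - i - 1 == -1' in Python, i.e. k = 0: pass
    else pvSetCell (pvSetCell m k j (pvGetCell m (k - 1) j)) (k - 1) j 0
  else m

def nihuta_alla (masiiv : List (List Int)) : List (List Int) :=
  let pikkus := masiiv.length - 1
  (List.range masiiv.length).foldl (fun m i =>
    (List.range (m.getD i []).length).foldl (aStep (pikkus - i)) m) masiiv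

-- ===== PORT B =====
-- body of B's shift loop: masiiv[r][j] = masiiv[r-1][j]
def bShift (j : Nat) (m : List (List Int)) (r : Nat) : List (List Int) :=
  pvSetCell m r j (pvGetCell m (r - 1) j)

-- body of B's column loop: find lowest zero (break = find? over the descending range), then block-shift
def bCol (n : Nat) (m : List (List Int)) (j : Nat) : List (List Int) :=
  match ((List.range n).reverse).find? (fun r => pvGetCell m r j == 0) with
  | none => m
  | some L => pvSetCell (((List.range L).reverse.map (· + 1)).foldl (bShift j) m) 0 j 0

def nihuta_alla_alt (masiiv : List (List Int)) : List (List Int) :=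
  if masiiv.isEmpty then masiiv
  else (List.range (masiiv.getD 0 []).length).foldl (bCol masiiv.length) masiiv

-- ===== PRECONDITION & SPEC =====
-- Pre_ excludes non-rectangular grids: A indexes row pikkus-i (and pikkus-i-1) by positions of row i,
-- which raises IndexError on most ragged inputs and on the rest depends on mirrored row lengths.
def Pre_nihuta_alla (masiiv : List (List Int)) : Prop :=
  ∀ row ∈ masiiv, row.length = (masiiv.headD []).length
instance (masiiv : List (List Int)) : Decidable (Pre_nihuta_alla masiiv) := by
  unfold Pre_nihuta_alla; infer_instance

def pvWitness_nihuta_alla : List (List Int) := [[1, 0], [0, 2]]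

def Spec_nihuta_alla (masiiv : List (List Int)) (out : List (List Int)) : Prop := out = nihuta_alla_alt masiiv
instance (masiiv : List (List Int)) (out : List (List Int)) : Decidable (Spec_nihuta_alla masiiv out) := by unfold Spec_nihuta_alla; infer_instance

-- ===== CLAIM (what is proved, stated in full; the proofs are below) =====
def Claim_equal_nihuta_alla : Prop := ∀ (masiiv : List (List Int)), Dom_nihuta_alla masiiv → Pre_nihuta_alla masiiv → Spec_nihuta_alla masiiv (nihuta_alla masiiv)

-- ===== LEMMAS AND PROOFS =====

-- column j of the matrix, as a list top-to-bottom (out-of-range cells read as 0)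
def colOf (m : List (List Int)) (j : Nat) : List Int := m.map (fun row => row.getD j 0)

-- the per-column action of A's step at row k, in column space
def stepCol (k : Nat) (c : List Int) : List Int :=
  if c.getD k 0 == 0 then
    if k = 0 then c else (c.set k (c.getD (k - 1) 0)).set (k - 1) 0
  else c

-- A's whole pass on one column of height n
def cascadeN (n : Nat) (c : List Int) : List Int :=
  (List.range n).foldl (fun c i => stepCol (n - 1 - i) c) c

-- the same pass as a structural recursion (bridge for the induction)
def cascadeRec : Nat → List Int → List Int
  | 0, c => c
  | k + 1, c => cascadeRec k (stepCol k c)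

-- B's per-column action, in column space
def lowZ (c : List Int) : Option Nat :=
  ((List.range c.length).reverse).find? (fun r => c.getD r 0 == 0)

def shiftFoldC (L : Nat) (c : List Int) : List Int :=
  ((List.range L).reverse.map (· + 1)).foldl (fun c r => c.set r (c.getD (r - 1) 0)) c

def colOpB (c : List Int) : List Int :=
  match lowZ c with
  | none => c
  | some L => (shiftFoldC L c).set 0 0

-- generic find? congruence on members (no such lemma found in Mathlib)
theorem find?_congr_mem {α : Type} (p q : α → Bool) (l : List α)
    (h : ∀ a ∈ l, p a = q a) : l.find? p = l.find? q := by
  induction l with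
  | nil => rfl
  | cons a l ih =>
    have hpa := h a List.mem_cons_self
    cases hq : q a
    · rw [List.find?_cons_of_neg (by simp [hpa, hq]), List.find?_cons_of_neg (by simp [hq])]
      exact ih fun b hb => h b (List.mem_cons_of_mem _ hb)
    · rw [List.find?_cons_of_pos (by simp [hpa, hq]), List.find?_cons_of_pos (by simp [hq])]

-- getD/set/append bookkeeping
theorem getD_set_self (l : List Int) (i : Nat) (a d : Int) (h : i < l.length) :
    (l.set i a).getD i d = a := by
  rw [List.getD_eq_getElem _ _ (by simpa using h), List.getElem_set_self]

theorem getD_set_ne (l : List Int) (i k : Nat) (a d : Int) (h : i ≠ k) :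
    (l.set i a).getD k d = l.getD k d := by
  by_cases hk : k < l.length
  · rw [List.getD_eq_getElem _ _ (by simpa using hk), List.getD_eq_getElem _ _ hk,
      List.getElem_set_ne h]
  · rw [List.getD_eq_default _ _ (by simpa using le_of_not_gt hk),
      List.getD_eq_default _ _ (le_of_not_gt hk)]

theorem getD_append_lt (c' : List Int) (x d : Int) (r : Nat) (h : r < c'.length) :
    (c' ++ [x]).getD r d = c'.getD r d := by
  rw [List.getD_eq_getElem _ _ (by simp; omega), List.getD_eq_getElem _ _ h,
    List.getElem_append_left h]

theorem getD_append_len (c' : List Int) (x d : Int) :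
    (c' ++ [x]).getD c'.length d = x := by
  rw [List.getD_eq_getElem _ _ (by simp)]
  simp

theorem set_append_lt (c' : List Int) (x v : Int) (r : Nat) (h : r < c'.length) :
    (c' ++ [x]).set r v = c'.set r v ++ [x] := by
  rw [List.set_append, if_pos h]

theorem set_append_len (c' : List Int) (x v : Int) :
    (c' ++ [x]).set c'.length v = c' ++ [v] := by
  rw [List.set_append, if_neg (lt_irrefl _), Nat.sub_self]
  rfl

-- stepCol basics
theorem stepCol_length (k : Nat) (c : List Int) : (stepCol k c).length = c.length := by
  unfold stepCol; split_ifs <;> simp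

theorem stepCol_append (k : Nat) (c' : List Int) (x : Int) (h : k < c'.length) :
    stepCol k (c' ++ [x]) = stepCol k c' ++ [x] := by
  unfold stepCol
  rw [getD_append_lt c' x 0 k h]
  by_cases hz : c'.getD k 0 == 0
  · rw [if_pos hz, if_pos hz]
    by_cases hk : k = 0
    · rw [if_pos hk, if_pos hk]
    · rw [if_neg hk, if_neg hk, getD_append_lt c' x 0 (k - 1) (by omega),
        set_append_lt c' x _ k h, set_append_lt _ x 0 (k - 1) (by rw [List.length_set]; omega)]
  · rw [if_neg hz, if_neg hz]

theorem cascade_split (n : Nat) (c : List Int) :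
    (List.range (n + 1)).foldl (fun c i => stepCol (n + 1 - 1 - i) c) c
      = (List.range n).foldl (fun c i => stepCol (n + 1 - 1 - (i + 1)) c)
          (stepCol (n + 1 - 1 - 0) c) := by
  simp only [List.range_succ_eq_map, List.foldl_cons, List.foldl_map, Nat.succ_eq_add_one]

theorem cascadeN_eq_rec (n : Nat) (c : List Int) : cascadeN n c = cascadeRec n c := by
  induction n generalizing c with
  | zero => rfl
  | succ n ih =>
    show (List.range (n + 1)).foldl (fun c i => stepCol (n + 1 - 1 - i) c) c = _
    rw [cascade_split]
    have he : (fun (c : List Int) (i : Nat) => stepCol (n + 1 - 1 - (i + 1)) c)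
        = fun c i => stepCol (n - 1 - i) c := by
      funext c i; congr 1; omega
    rw [he, show n + 1 - 1 - 0 = n from by omega]
    exact ih (stepCol n c)

theorem cascadeRec_append (k : Nat) (c' : List Int) (x : Int) (h : k ≤ c'.length) :
    cascadeRec k (c' ++ [x]) = cascadeRec k c' ++ [x] := by
  induction k generalizing c' with
  | zero => rfl
  | succ k ih =>
    simp only [cascadeRec]
    rw [stepCol_append k c' x (by omega)]
    exact ih (stepCol k c') (by rw [stepCol_length]; omega)

-- lowZ facts
theorem lowZ_lt {c : List Int} {L : Nat} (h : lowZ c = some L) : L < c.length := by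
  have hm := List.mem_of_find?_eq_some h
  simpa using hm

theorem rev_range_succ (n : Nat) : (List.range (n + 1)).reverse = n :: (List.range n).reverse := by
  simp [List.range_succ]

theorem lowZ_append (c' : List Int) (x : Int) :
    lowZ (c' ++ [x]) = if x == 0 then some c'.length else lowZ c' := by
  unfold lowZ
  rw [show (c' ++ [x]).length = c'.length + 1 from by simp, rev_range_succ]
  have hp : ((c' ++ [x]).getD c'.length 0 == 0) = (x == 0) := by rw [getD_append_len]
  cases hx : (x == 0)
  · rw [List.find?_cons_of_neg (by simp only [hp, hx]; decide), if_neg (by simp)]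
    apply find?_congr_mem
    intro r hr
    have hrn : r < c'.length := List.mem_range.mp (List.mem_reverse.mp hr)
    show ((c' ++ [x]).getD r 0 == 0) = (c'.getD r 0 == 0)
    rw [getD_append_lt c' x 0 r hrn]
  · rw [List.find?_cons_of_pos (by simp only [hp, hx]), if_pos (by simp)]

theorem lowZ_set_last (c' : List Int) (h : 0 < c'.length) :
    lowZ (c'.set (c'.length - 1) 0) = some (c'.length - 1) := by
  unfold lowZ
  rw [List.length_set]
  obtain ⟨n, hn⟩ : ∃ n, c'.length = n + 1 := ⟨c'.length - 1, by omega⟩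
  have hn1 : c'.length - 1 = n := by omega
  rw [hn1, hn, rev_range_succ]
  have hp : ((c'.set n 0).getD n 0 == 0) = true := by
    rw [getD_set_self c' n 0 0 (by omega)]
    decide
  rw [List.find?_cons_of_pos (by simp only [hp])]

-- B's block shift in closed form
theorem shiftFoldC_step (L : Nat) (c : List Int) :
    shiftFoldC (L + 1) c = shiftFoldC L (c.set (L + 1) (c.getD L 0)) := by
  simp [shiftFoldC, List.range_succ]

theorem shiftFoldC_closed (L : Nat) (c : List Int) (h : L < c.length) :
    (shiftFoldC L c).set 0 0 = 0 :: c.take L ++ c.drop (L + 1) := by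
  induction L generalizing c with
  | zero =>
    simp [shiftFoldC]
    obtain ⟨x, c', rfl⟩ := List.exists_cons_of_ne_nil (List.ne_nil_of_length_pos h)
    simp
  | succ L ih =>
    have hL' : L < c.length := by omega
    rw [shiftFoldC_step]
    have hd : L < (c.set (L + 1) (c.getD L 0)).length := by simpa using by omega
    rw [ih _ hd]
    rw [List.take_set, List.set_eq_of_length_le (by simp [List.length_take])]
    rw [List.drop_set, if_neg (lt_irrefl _), Nat.sub_self]
    rw [List.getD_eq_getElem c 0 hL']
    rw [List.drop_eq_getElem_cons h, List.set_cons_zero]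
    rw [List.take_add_one, List.getElem?_eq_getElem hL']
    rw [Option.toList_some, List.append_cons, List.cons_append]

theorem colOpB_none {c : List Int} (h : lowZ c = none) : colOpB c = c := by
  unfold colOpB; rw [h]

theorem colOpB_some {c : List Int} {L : Nat} (h : lowZ c = some L) :
    colOpB c = 0 :: c.take L ++ c.drop (L + 1) := by
  unfold colOpB
  rw [h]
  exact shiftFoldC_closed L c (lowZ_lt h)

-- the central per-column equivalence, in recursion form
theorem cascadeRec_eq (n : Nat) : ∀ c : List Int, c.length = n → cascadeRec n c = colOpB c := by
  induction n with
  | zero =>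
    intro c hc
    rw [List.length_eq_zero_iff.mp hc]
    rfl
  | succ n ih =>
    intro c hc
    have hne : c ≠ [] := by intro h; rw [h] at hc; simp at hc
    obtain ⟨c', x, rfl⟩ : ∃ c' x, c = c' ++ [x] :=
      ⟨c.dropLast, c.getLast hne, (List.dropLast_append_getLast hne).symm⟩
    have hlen : c'.length = n := by simp at hc; omega
    subst hlen
    simp only [cascadeRec]
    by_cases hx : x == 0
    · have hx0 : x = 0 := by simpa using hx
      subst hx0
      by_cases hc'e : c' = []
      · subst hc'e; decide
      · have hpos : 0 < c'.length := List.length_pos_of_ne_nil hc'e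
        have hstep : stepCol c'.length (c' ++ [0])
            = c'.set (c'.length - 1) 0 ++ [c'.getD (c'.length - 1) 0] := by
          unfold stepCol
          rw [getD_append_len, if_pos (by decide), if_neg (by omega),
            getD_append_lt c' 0 0 (c'.length - 1) (by omega), set_append_len,
            set_append_lt c' _ 0 (c'.length - 1) (by omega)]
        rw [hstep, cascadeRec_append c'.length (c'.set (c'.length - 1) 0)
            (c'.getD (c'.length - 1) 0) (by simp),
          ih (c'.set (c'.length - 1) 0) List.length_set]
        have h1 : colOpB (c'.set (c'.length - 1) 0) = 0 :: c'.take (c'.length - 1) := by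
          rw [colOpB_some (lowZ_set_last c' hpos), List.take_set,
            List.set_eq_of_length_le (by rw [List.length_take]; omega),
            show c'.length - 1 + 1 = c'.length from by omega,
            List.drop_eq_nil_of_le (by rw [List.length_set])]
          simp
        have hlz2 : lowZ (c' ++ [0]) = some c'.length := by rw [lowZ_append]; simp
        have h2 : colOpB (c' ++ [0]) = 0 :: c' := by
          rw [colOpB_some hlz2,
            List.take_append_of_le_length (le_refl _), List.take_length,
            List.drop_eq_nil_of_le (by simp)]
          simp
        rw [h1, h2]
        have hl1 : c'.length - 1 < c'.length := by omega
        have h3 : c'.take (c'.length - 1) ++ [c'.getD (c'.length - 1) 0] = c' := by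
          have htk : List.take (c'.length - 1 + 1) c'
              = List.take (c'.length - 1) c' ++ (c'[c'.length - 1]?).toList :=
            List.take_add_one
          rw [show c'.length - 1 + 1 = c'.length from by omega, List.take_length] at htk
          rw [List.getD_eq_getElem c' 0 hl1]
          conv_rhs => rw [htk]
          rw [List.getElem?_eq_getElem hl1]
          rfl
        rw [List.cons_append, h3]
    · have hxstep : stepCol c'.length (c' ++ [x]) = c' ++ [x] := by
        unfold stepCol
        rw [getD_append_len, if_neg (by simp [hx])]
      rw [hxstep, cascadeRec_append _ _ _ (le_refl _), ih c' rfl]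
      have hlz : lowZ (c' ++ [x]) = lowZ c' := by rw [lowZ_append, if_neg (by simp [hx])]
      cases hlc : lowZ c' with
      | none => rw [colOpB_none hlc, colOpB_none (hlz.trans hlc)]
      | some L =>
        have hL : L < c'.length := lowZ_lt hlc
        rw [colOpB_some hlc, colOpB_some (hlz.trans hlc),
          List.take_append_of_le_length (by omega), List.drop_append_of_le_length (by omega)]
        simp

-- the central per-column equivalence
theorem cascadeN_eq_colOpB (n : Nat) (c : List Int) (h : c.length = n) :
    cascadeN n c = colOpB c := by
  rw [cascadeN_eq_rec]
  exact cascadeRec_eq n c h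

-- matrix-side bookkeeping
theorem colOf_length (m : List (List Int)) (j : Nat) : (colOf m j).length = m.length := by
  simp [colOf]

theorem shape_length {m m' : List (List Int)}
    (h : m.map List.length = m'.map List.length) : m.length = m'.length := by
  have := congrArg List.length h; simpa using this

theorem getD_colOf (m : List (List Int)) (r j : Nat) (h : r < m.length) :
    (colOf m j).getD r 0 = pvGetCell m r j := by
  unfold colOf pvGetCell
  rw [List.getD_eq_getElem _ _ (by simpa using h), List.getElem_map,
    List.getD_eq_getElem m [] h]

theorem rowlen {m masiiv : List (List Int)} {w : Nat}
    (hsh : m.map List.length = masiiv.map List.length)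
    (hrect : ∀ row ∈ masiiv, row.length = w) (r : Nat) (h : r < m.length) :
    (m.getD r []).length = w := by
  have hr' : r < masiiv.length := by rw [← shape_length hsh]; exact h
  have e1 : (m.map List.length).getD r 0 = (m.getD r []).length := by
    rw [List.getD_eq_getElem _ _ (by simpa using h), List.getElem_map,
      List.getD_eq_getElem m [] h]
  have e2 : (masiiv.map List.length).getD r 0 = (masiiv.getD r []).length := by
    rw [List.getD_eq_getElem _ _ (by simpa using hr'), List.getElem_map,
      List.getD_eq_getElem masiiv [] hr']
  have e3 : (masiiv.getD r []).length = w := by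
    apply hrect
    rw [List.getD_eq_getElem masiiv [] hr']
    exact List.getElem_mem hr'
  rw [← e1, hsh, e2, e3]

theorem pvSetCell_length (m : List (List Int)) (r j : Nat) (v : Int) :
    (pvSetCell m r j v).length = m.length := List.length_set

theorem pvSetCell_shape (m : List (List Int)) (r j : Nat) (v : Int) :
    (pvSetCell m r j v).map List.length = m.map List.length := by
  unfold pvSetCell
  by_cases hr : r < m.length
  · rw [List.map_set]
    apply List.ext_getElem (by simp)
    intro i h1 h2
    rw [List.getElem_set]
    split_ifs with he
    · subst he
      rw [List.length_set, List.getD_eq_getElem m [] hr, List.getElem_map]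
    · rfl
  · rw [List.set_eq_of_length_le (le_of_not_gt hr)]

theorem colOf_pvSetCell_ne (m : List (List Int)) (r j j' : Nat) (v : Int) (h : j' ≠ j) :
    colOf (pvSetCell m r j v) j' = colOf m j' := by
  unfold pvSetCell colOf
  rw [List.map_set, getD_set_ne _ _ _ _ _ (fun he => h he.symm)]
  by_cases hr : r < m.length
  · rw [List.getD_eq_getElem m [] hr]
    apply List.ext_getElem (by simp)
    intro i h1 h2
    rw [List.getElem_set]
    split_ifs with he
    · subst he; rw [List.getElem_map]
    · rfl
  · rw [List.set_eq_of_length_le (by simpa using le_of_not_gt hr)]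

theorem colOf_pvSetCell_self (m : List (List Int)) (r j : Nat) (v : Int)
    (hj : j < (m.getD r []).length) :
    colOf (pvSetCell m r j v) j = (colOf m j).set r v := by
  unfold pvSetCell colOf
  rw [List.map_set, getD_set_self _ _ _ _ hj]

-- A's loop body, in column space
theorem aStep_char (masiiv m : List (List Int)) (w k j : Nat)
    (hsh : m.map List.length = masiiv.map List.length)
    (hrect : ∀ row ∈ masiiv, row.length = w)
    (hk : k < masiiv.length) (hj : j < w) :
    (aStep k m j).map List.length = masiiv.map List.length ∧
    colOf (aStep k m j) j = stepCol k (colOf m j) ∧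
    ∀ j', j' ≠ j → colOf (aStep k m j) j' = colOf m j' := by
  have hm : m.length = masiiv.length := shape_length hsh
  have hkm : k < m.length := by omega
  have hg : pvGetCell m k j = (colOf m j).getD k 0 := (getD_colOf m k j hkm).symm
  unfold aStep stepCol
  rw [hg]
  by_cases hz : (colOf m j).getD k 0 == 0
  · rw [if_pos hz, if_pos hz]
    by_cases hk0 : k = 0
    · rw [if_pos hk0, if_pos hk0]
      exact ⟨hsh, rfl, fun _ _ => rfl⟩
    · rw [if_neg hk0, if_neg hk0]
      have hk1m : k - 1 < m.length := by omega
      have hgv : pvGetCell m (k - 1) j = (colOf m j).getD (k - 1) 0 :=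
        (getD_colOf m (k - 1) j hk1m).symm
      have hjk : j < (m.getD k []).length := by rw [rowlen hsh hrect k hkm]; exact hj
      have hjk1 : j < ((pvSetCell m k j (pvGetCell m (k - 1) j)).getD (k - 1) []).length := by
        rw [rowlen ((pvSetCell_shape m k j _).trans hsh) hrect (k - 1)
          (by rw [pvSetCell_length]; omega)]
        exact hj
      refine ⟨?_, ?_, ?_⟩
      · rw [pvSetCell_shape, pvSetCell_shape]; exact hsh
      · rw [colOf_pvSetCell_self _ (k - 1) j 0 hjk1, colOf_pvSetCell_self m k j _ hjk, hgv]
      · intro j' hj'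
        rw [colOf_pvSetCell_ne _ _ _ _ _ hj', colOf_pvSetCell_ne _ _ _ _ _ hj']
  · rw [if_neg hz, if_neg hz]
    exact ⟨hsh, rfl, fun _ _ => rfl⟩

-- A's inner loop over the columns of one row
theorem aFold_char (masiiv : List (List Int)) (w k : Nat)
    (hrect : ∀ row ∈ masiiv, row.length = w) (hk : k < masiiv.length) :
    ∀ (t : Nat), t ≤ w → ∀ (m : List (List Int)),
      m.map List.length = masiiv.map List.length →
      (((List.range t).foldl (aStep k) m).map List.length = masiiv.map List.length) ∧
      (∀ j, j < t → colOf ((List.range t).foldl (aStep k) m) j = stepCol k (colOf m j)) ∧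
      (∀ j, t ≤ j → colOf ((List.range t).foldl (aStep k) m) j = colOf m j) := by
  intro t
  induction t with
  | zero => exact fun _ m hsh => ⟨hsh, fun j hj => absurd hj (by omega), fun j _ => rfl⟩
  | succ t ih =>
    intro htw m hsh
    rw [List.range_succ, List.foldl_append, List.foldl_cons, List.foldl_nil]
    obtain ⟨i1, i2, i3⟩ := ih (by omega) m hsh
    obtain ⟨s1, s2, s3⟩ := aStep_char masiiv _ w k t i1 hrect hk (by omega)
    refine ⟨s1, ?_, ?_⟩
    · intro j hj
      by_cases hjt : j = t
      · subst hjt; rw [s2, i3 j (le_refl _)]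
      · rw [s3 j hjt, i2 j (by omega)]
    · intro j hj
      rw [s3 j (by omega), i3 j (by omega)]

-- B's loop bodies, in column space
theorem bShift_char (masiiv m : List (List Int)) (w j r : Nat)
    (hsh : m.map List.length = masiiv.map List.length)
    (hrect : ∀ row ∈ masiiv, row.length = w)
    (hr : r < masiiv.length) (hj : j < w) :
    (bShift j m r).map List.length = masiiv.map List.length ∧
    colOf (bShift j m r) j = (colOf m j).set r ((colOf m j).getD (r - 1) 0) ∧
    ∀ j', j' ≠ j → colOf (bShift j m r) j' = colOf m j' := by
  have hm : m.length = masiiv.length := shape_length hsh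
  unfold bShift
  refine ⟨(pvSetCell_shape _ _ _ _).trans hsh, ?_,
    fun j' hj' => colOf_pvSetCell_ne _ _ _ _ _ hj'⟩
  rw [colOf_pvSetCell_self m r j _ (by rw [rowlen hsh hrect r (by omega)]; exact hj),
    getD_colOf m (r - 1) j (by omega)]

theorem bFold_char (masiiv : List (List Int)) (w j : Nat)
    (hrect : ∀ row ∈ masiiv, row.length = w) (hj : j < w) :
    ∀ (rs : List Nat), (∀ r ∈ rs, r < masiiv.length) →
    ∀ m, m.map List.length = masiiv.map List.length →
      ((rs.foldl (bShift j) m).map List.length = masiiv.map List.length) ∧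
      colOf (rs.foldl (bShift j) m) j
        = rs.foldl (fun c r => c.set r (c.getD (r - 1) 0)) (colOf m j) ∧
      ∀ j', j' ≠ j → colOf (rs.foldl (bShift j) m) j' = colOf m j' := by
  intro rs
  induction rs with
  | nil => exact fun _ m hsh => ⟨hsh, rfl, fun _ _ => rfl⟩
  | cons r rs ih =>
    intro hmem m hsh
    rw [List.foldl_cons, List.foldl_cons]
    obtain ⟨s1, s2, s3⟩ := bShift_char masiiv m w j r hsh hrect (hmem r (by simp)) hj
    obtain ⟨i1, i2, i3⟩ := ih (fun r' hr' => hmem r' (by simp [hr'])) (bShift j m r) s1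
    exact ⟨i1, by rw [i2, s2], fun j' hj' => by rw [i3 j' hj', s3 j' hj']⟩

theorem bCol_char (masiiv m : List (List Int)) (w j : Nat)
    (hsh : m.map List.length = masiiv.map List.length)
    (hrect : ∀ row ∈ masiiv, row.length = w) (hj : j < w) :
    (bCol masiiv.length m j).map List.length = masiiv.map List.length ∧
    colOf (bCol masiiv.length m j) j = colOpB (colOf m j) ∧
    ∀ j', j' ≠ j → colOf (bCol masiiv.length m j) j' = colOf m j' := by
  have hm : m.length = masiiv.length := shape_length hsh
  have hfind : ((List.range masiiv.length).reverse).find? (fun r => pvGetCell m r j == 0)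
      = lowZ (colOf m j) := by
    unfold lowZ
    rw [colOf_length, hm]
    apply find?_congr_mem
    intro r hr
    have hrn : r < masiiv.length := List.mem_range.mp (List.mem_reverse.mp hr)
    rw [getD_colOf m r j (by omega)]
  unfold bCol
  rw [hfind]
  cases hlz : lowZ (colOf m j) with
  | none => exact ⟨hsh, by rw [colOpB_none hlz], fun _ _ => rfl⟩
  | some L =>
    have hL : L < masiiv.length := by
      have := lowZ_lt hlz; rwa [colOf_length, hm] at this
    have hmem : ∀ r ∈ (List.range L).reverse.map (· + 1), r < masiiv.length := by
      intro r hr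
      simp only [List.mem_map, List.mem_reverse, List.mem_range] at hr
      obtain ⟨i, hi, rfl⟩ := hr
      omega
    obtain ⟨f1, f2, f3⟩ := bFold_char masiiv w j hrect hj _ hmem m hsh
    refine ⟨(pvSetCell_shape _ _ _ _).trans f1, ?_, ?_⟩
    · rw [colOf_pvSetCell_self _ 0 j 0 (by rw [rowlen f1 hrect 0
          (by rw [shape_length f1]; omega)]; exact hj), f2]
      exact (shiftFoldC_closed L _ (by rw [colOf_length, hm]; exact hL)).trans
        (colOpB_some hlz).symm
    · intro j' hj'
      rw [colOf_pvSetCell_ne _ _ _ _ _ hj', f3 j' hj']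

-- reconstruction: equal shapes and equal columns give equal matrices
theorem eq_of_shape_col (m1 m2 : List (List Int))
    (hs : m1.map List.length = m2.map List.length)
    (hc : ∀ j, colOf m1 j = colOf m2 j) : m1 = m2 := by
  have hlen : m1.length = m2.length := shape_length hs
  apply List.ext_getElem hlen
  intro r h1 h2
  have hrl : m1[r].length = m2[r].length := by
    have e : (m1.map List.length).getD r 0 = (m2.map List.length).getD r 0 := by rw [hs]
    rw [List.getD_eq_getElem _ _ (by simpa using h1),
      List.getD_eq_getElem _ _ (by simpa using h2)] at e
    simpa using e
  apply List.ext_getElem hrl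
  intro j hj1 hj2
  have e : (colOf m1 j).getD r 0 = (colOf m2 j).getD r 0 := by rw [hc j]
  simp only [colOf] at e
  rw [List.getD_eq_getElem _ _ (by simpa using h1),
    List.getD_eq_getElem _ _ (by simpa using h2)] at e
  simp only [List.getElem_map] at e
  rw [List.getD_eq_getElem _ _ hj1, List.getD_eq_getElem _ _ hj2] at e
  exact e

-- characterization of port A
theorem portA_char (masiiv : List (List Int)) (w : Nat)
    (hrect : ∀ row ∈ masiiv, row.length = w) :
    (nihuta_alla masiiv).map List.length = masiiv.map List.length ∧
    (∀ j, j < w → colOf (nihuta_alla masiiv) j = cascadeN masiiv.length (colOf masiiv j)) ∧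
    (∀ j, w ≤ j → colOf (nihuta_alla masiiv) j = colOf masiiv j) := by
  have hA : nihuta_alla masiiv = (List.range masiiv.length).foldl
      (fun m i => (List.range ((m.getD i []).length)).foldl
        (aStep (masiiv.length - 1 - i)) m) masiiv := rfl
  rw [hA]
  suffices H : ∀ t, t ≤ masiiv.length →
      (((List.range t).foldl (fun m i => (List.range ((m.getD i []).length)).foldl
          (aStep (masiiv.length - 1 - i)) m) masiiv).map List.length
        = masiiv.map List.length) ∧
      (∀ j, j < w → colOf ((List.range t).foldl (fun m i =>
          (List.range ((m.getD i []).length)).foldl (aStep (masiiv.length - 1 - i)) m) masiiv) j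
        = (List.range t).foldl (fun c i => stepCol (masiiv.length - 1 - i) c) (colOf masiiv j)) ∧
      (∀ j, w ≤ j → colOf ((List.range t).foldl (fun m i =>
          (List.range ((m.getD i []).length)).foldl (aStep (masiiv.length - 1 - i)) m) masiiv) j
        = colOf masiiv j) by
    obtain ⟨h1, h2, h3⟩ := H masiiv.length (le_refl _)
    exact ⟨h1, h2, h3⟩
  intro t
  induction t with
  | zero => exact fun _ => ⟨rfl, fun j hj => rfl, fun _ _ => rfl⟩
  | succ t ih =>
    intro htn
    obtain ⟨i1, i2, i3⟩ := ih (by omega)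
    rw [List.range_succ, List.foldl_append, List.foldl_cons, List.foldl_nil]
    have hlen : (((List.range t).foldl (fun m i => (List.range ((m.getD i []).length)).foldl
        (aStep (masiiv.length - 1 - i)) m) masiiv).getD t []).length = w :=
      rowlen i1 hrect t (by rw [shape_length i1]; omega)
    rw [hlen]
    obtain ⟨s1, s2, s3⟩ := aFold_char masiiv w (masiiv.length - 1 - t) hrect
      (by omega) w (le_refl _) _ i1
    refine ⟨s1, ?_, ?_⟩
    · intro j hj
      rw [s2 j hj, i2 j hj, List.foldl_append, List.foldl_cons, List.foldl_nil]
    · intro j hj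
      rw [s3 j hj, i3 j hj]

-- characterization of port B
theorem portB_char (masiiv : List (List Int)) (w : Nat)
    (hrect : ∀ row ∈ masiiv, row.length = w) :
    (nihuta_alla_alt masiiv).map List.length = masiiv.map List.length ∧
    (∀ j, j < w → colOf (nihuta_alla_alt masiiv) j = colOpB (colOf masiiv j)) ∧
    (∀ j, w ≤ j → colOf (nihuta_alla_alt masiiv) j = colOf masiiv j) := by
  by_cases hemp : masiiv.isEmpty
  · have hmn : masiiv = [] := by simpa [List.isEmpty_iff] using hemp
    subst hmn
    exact ⟨rfl, fun j hj => rfl, fun _ _ => rfl⟩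
  · have hne : masiiv ≠ [] := by simpa [List.isEmpty_iff] using hemp
    have hB : nihuta_alla_alt masiiv
        = (List.range ((masiiv.getD 0 []).length)).foldl (bCol masiiv.length) masiiv := by
      unfold nihuta_alla_alt
      rw [if_neg (by simpa using hemp)]
    have hw0 : (masiiv.getD 0 []).length = w := by
      rw [List.getD_eq_getElem masiiv [] (List.length_pos_of_ne_nil hne)]
      exact hrect _ (List.getElem_mem _)
    rw [hB, hw0]
    suffices H : ∀ t, t ≤ w →
        (((List.range t).foldl (bCol masiiv.length) masiiv).map List.length
          = masiiv.map List.length) ∧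
        (∀ j, j < t → colOf ((List.range t).foldl (bCol masiiv.length) masiiv) j
          = colOpB (colOf masiiv j)) ∧
        (∀ j, t ≤ j → colOf ((List.range t).foldl (bCol masiiv.length) masiiv) j
          = colOf masiiv j) by
      obtain ⟨h1, h2, h3⟩ := H w (le_refl w)
      exact ⟨h1, h2, fun j hj => h3 j hj⟩
    intro t
    induction t with
    | zero => exact fun _ => ⟨rfl, fun j hj => absurd hj (by omega), fun _ _ => rfl⟩
    | succ t ih =>
      intro htw
      obtain ⟨i1, i2, i3⟩ := ih (by omega)
      rw [List.range_succ, List.foldl_append, List.foldl_cons, List.foldl_nil]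
      obtain ⟨c1, c2, c3⟩ := bCol_char masiiv _ w t i1 hrect (by omega)
      refine ⟨c1, ?_, ?_⟩
      · intro j hj
        by_cases hjt : j = t
        · subst hjt; rw [c2, i3 j (le_refl _)]
        · rw [c3 j hjt, i2 j (by omega)]
      · intro j hj
        rw [c3 j (by omega), i3 j (by omega)]

-- ===== VERDICT (by name: the statement is the Claim_ definition above) =====
theorem nihuta_alla_spec : Claim_equal_nihuta_alla := by
  intro masiiv _ hpre
  unfold Spec_nihuta_alla
  set w := (masiiv.headD []).length with hw
  have hrect : ∀ row ∈ masiiv, row.length = w := hpre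
  obtain ⟨hsA, hcA, hoA⟩ := portA_char masiiv w hrect
  obtain ⟨hsB, hcB, hoB⟩ := portB_char masiiv w hrect
  apply eq_of_shape_col
  · rw [hsA, hsB]
  · intro j
    by_cases hj : j < w
    · rw [hcA j hj, hcB j hj,
        cascadeN_eq_colOpB masiiv.length (colOf masiiv j) (by simp [colOf])]
    · rw [hoA j (le_of_not_gt hj), hoB j (le_of_not_gt hj)]
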